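-- pv_equiv track=rewrite | github.com/voidful/Phraseg | phraseg/main.py | _get_all_superlap
-- ===== SOURCE A (Python) =====
-- def _get_all_superlap(words_list, sentence):
--     superlap_list = []
--     for word in words_list:
--         if len(word) < 2:
--             continue
--         waitinglist = [word]
--         word_index = sentence.find(word)
--         if word_index >= 0:
--             for right_index in range(1, len(sentence) - word_index):
--                 right = sentence[word_index:word_index + len(word) + right_index]
--                 if len(right) > 1 and " " not in right:
--                     waitinglist.append(right)
--             for left_index in range(1, word_index):
--                 left = sentence[word_index - left_index:word_index + len(word)]
--                 if len(left) > 1 and " " not in left: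
--                     waitinglist.append(left)
--             if waitinglist not in superlap_list:
--                 superlap_list.append(waitinglist)
--     return superlap_list
-- ===== SOURCE B (Python) =====
-- def _get_all_superlap(words_list, sentence):
--     n = len(sentence)
--     # nxt[p]: index of the first space at or after position p (n when there is none)
--     nxt = [n] * (n + 1)
--     for p in reversed(range(n)):
--         nxt[p] = p if sentence[p] == " " else nxt[p + 1]
--     out = []
--     seen = set()
--     for word in words_list:
--         w = len(word)
--         if w < 2 or word in seen:
--             continue
--         i = sentence.find(word)
--         if i < 0:
--             continue
--         seen.add(word)
--         group = [word]
--         for k in range(1, n - i):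
--             e = min(i + w + k, n)
--             if nxt[i] >= e:
--                 group.append(sentence[i:e])
--         for k in range(1, i):
--             if nxt[i - k] >= i + w:
--                 group.append(sentence[i - k:i + w])
--         out.append(group)
--     return out
-- ===== Notes on version B (the rewrite author's own statement) =====
-- stated objective: alternative
-- what changed: B precomputes one next-space-index table for the sentence and tests each candidate extension against it instead of building every candidate substring and rescanning it for a space, and deduplicates through a set of head words with an early skip instead of A's list-membership comparison of whole groups.
import Mathlib
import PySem

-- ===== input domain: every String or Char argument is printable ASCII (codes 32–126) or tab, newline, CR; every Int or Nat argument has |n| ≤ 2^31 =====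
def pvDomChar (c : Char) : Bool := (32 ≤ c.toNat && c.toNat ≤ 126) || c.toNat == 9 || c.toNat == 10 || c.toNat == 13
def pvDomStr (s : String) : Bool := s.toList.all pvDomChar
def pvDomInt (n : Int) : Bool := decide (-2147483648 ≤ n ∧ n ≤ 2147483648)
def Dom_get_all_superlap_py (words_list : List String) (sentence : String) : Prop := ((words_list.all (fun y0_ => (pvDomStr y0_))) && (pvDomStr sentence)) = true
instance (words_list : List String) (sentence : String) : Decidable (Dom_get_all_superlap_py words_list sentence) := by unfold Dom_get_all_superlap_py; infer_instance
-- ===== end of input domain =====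

-- B precomputes a next-space-index table and tests each candidate extension against it
-- (instead of building and rescanning every candidate substring), and deduplicates by a
-- set of head words with an early skip; identical return value.

-- ===== PORT A =====

def get_all_superlap_py (words_list : List String) (sentence : String) : List (List String) :=
  words_list.foldl (fun superlap_list word =>
    if PySem.Str.len word < 2 then superlap_list else
    let waitinglist : List String := [word]
    let word_index : Int := PySem.Str.find sentence word
    if word_index ≥ 0 then
      let wl1 := (PySem.List.pyRange 1 (PySem.Str.len sentence - word_index) 1).foldl
        (fun wl right_index =>
          let right := PySem.Str.slice sentence (some word_index)
            (some (word_index + PySem.Str.len word + right_index))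
          if decide (1 < PySem.Str.len right) && !(PySem.Str.isIn " " right) then wl ++ [right] else wl)
        waitinglist
      let wl2 := (PySem.List.pyRange 1 word_index 1).foldl
        (fun wl left_index =>
          let left := PySem.Str.slice sentence (some (word_index - left_index))
            (some (word_index + PySem.Str.len word))
          if decide (1 < PySem.Str.len left) && !(PySem.Str.isIn " " left) then wl ++ [left] else wl)
        wl1
      if wl2 ∉ superlap_list then superlap_list ++ [wl2] else superlap_list
    else superlap_list) []

-- ===== PORT B =====
def get_all_superlap_py_alt (words_list : List String) (sentence : String) : List (List String) :=
  let n := PySem.Str.len sentence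
  -- nxt[p]: index of the first space at or after position p (n when there is none)
  let nxt : List Int := List.replicate (n + 1).toNat n
  let nxt := ((PySem.List.pyRange 0 n 1).reverse).foldl
    (fun nxt p => PySem.List.pySetD nxt p
      (if PySem.Str.pyGet? sentence p = some ' ' then p else PySem.List.pyGetD nxt (p + 1) 0))
    nxt
  (words_list.foldl (fun st word =>
    let w := PySem.Str.len word
    if w < 2 ∨ PySem.Set.contains st.2 word then st else
    let i := PySem.Str.find sentence word
    if i < 0 then st else
    let group : List String := [word]
    let group := (PySem.List.pyRange 1 (n - i) 1).foldl (fun g k =>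
      let e := min (i + w + k) n
      if PySem.List.pyGetD nxt i 0 ≥ e then
        g ++ [PySem.Str.slice sentence (some i) (some e)] else g) group
    let group := (PySem.List.pyRange 1 i 1).foldl (fun g k =>
      if PySem.List.pyGetD nxt (i - k) 0 ≥ i + w then
        g ++ [PySem.Str.slice sentence (some (i - k)) (some (i + w))] else g) group
    (st.1 ++ [group], PySem.Set.add st.2 word))
    (([] : List (List String)), (PySem.Set.empty : PySem.Set String))).1

-- ===== PRECONDITION & SPEC =====
def Spec_get_all_superlap_py (words_list : List String) (sentence : String) (out : List (List String)) : Prop := out = get_all_superlap_py_alt words_list sentence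
instance (words_list : List String) (sentence : String) (out : List (List String)) : Decidable (Spec_get_all_superlap_py words_list sentence out) := by unfold Spec_get_all_superlap_py; infer_instance

-- ===== CLAIM (what is proved, stated in full; the proofs are below) =====
def Claim_equal_get_all_superlap_py : Prop := ∀ (words_list : List String) (sentence : String), Dom_get_all_superlap_py words_list sentence → Spec_get_all_superlap_py words_list sentence (get_all_superlap_py words_list sentence)

-- ===== LEMMAS AND PROOFS =====

-- first index ≥ j in cs that is a space, or cs.length if none (for j ≤ cs.length)
def pvStop (cs : List Char) (j : Nat) : Nat := j + (cs.drop j).findIdx (fun c => c == ' ')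

lemma pvStop_le_self (cs : List Char) (j : Nat) : j ≤ pvStop cs j := Nat.le_add_right _ _

lemma pvStop_nospace (cs : List Char) (j t : Nat) (h1 : j ≤ t) (h2 : t < pvStop cs j) :
    cs[t]? ≠ some ' ' := by
  have hfl := List.findIdx_le_length (p := fun c => c == ' ') (xs := cs.drop j)
  have hu : t - j < (cs.drop j).findIdx (fun c => c == ' ') := by unfold pvStop at h2; omega
  have hlen : t - j < (cs.drop j).length := lt_of_lt_of_le hu hfl
  have hne := List.not_of_lt_findIdx hu
  simp only [List.getElem_drop] at hne
  have htl : t < cs.length := by simp [List.length_drop] at hlen; omega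
  have heq : cs[j + (t - j)]'(by omega) = cs[t]'htl := by congr 1; omega
  rw [heq] at hne
  simp only [List.getElem?_eq_getElem htl]
  intro hc
  simp only [Option.some.injEq] at hc
  rw [hc] at hne
  simp at hne

lemma pvStop_space (cs : List Char) (j : Nat) (h : pvStop cs j < cs.length) :
    cs[pvStop cs j]? = some ' ' := by
  by_cases hj : j ≤ cs.length
  · have hfl : (cs.drop j).findIdx (fun c => c == ' ') < (cs.drop j).length := by
      simp only [List.length_drop]
      unfold pvStop at h; omega
    have := List.findIdx_getElem (w := hfl) (xs := cs.drop j) (p := fun c => c == ' ')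
    simp only [List.getElem_drop] at this
    have hlt : j + (cs.drop j).findIdx (fun c => c == ' ') < cs.length := by
      simp only [List.length_drop] at hfl; omega
    unfold pvStop
    rw [List.getElem?_eq_getElem hlt]
    simpa using this
  · exfalso
    have : cs.drop j = [] := by
      apply List.drop_eq_nil_of_le; omega
    unfold pvStop at h
    rw [this] at h
    simp at h
    omega

lemma pvStop_step (cs : List Char) (j : Nat) (h1 : j < cs.length) (h2 : cs[j]? ≠ some ' ') :
    pvStop cs j = pvStop cs (j + 1) := by
  have hd : cs.drop j = cs[j] :: cs.drop (j + 1) := List.drop_eq_getElem_cons h1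
  have hne : (cs[j] == ' ') = false := by
    rw [List.getElem?_eq_getElem h1] at h2
    simp only [ne_eq, Option.some.injEq] at h2
    simp [h2]
  unfold pvStop
  rw [hd, List.findIdx_cons, hne]
  simp
  omega

lemma pvStop_here (cs : List Char) (j : Nat) (h1 : j < cs.length) (h2 : cs[j]? = some ' ') :
    pvStop cs j = j := by
  have hd : cs.drop j = cs[j] :: cs.drop (j + 1) := List.drop_eq_getElem_cons h1
  have hsp : (cs[j] == ' ') = true := by
    rw [List.getElem?_eq_getElem h1] at h2
    simp only [Option.some.injEq] at h2
    simp [h2]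
  unfold pvStop
  rw [hd, List.findIdx_cons, hsp]
  simp

lemma pvStop_past (cs : List Char) (j : Nat) (h : cs.length ≤ j) : pvStop cs j = j := by
  unfold pvStop
  rw [List.drop_eq_nil_of_le h]
  simp

lemma isIn_space_slice (s : String) (a b : Nat) :
    PySem.Str.isIn " " (PySem.Str.slice s (some (a : Int)) (some (b : Int))) = true ↔
      ∃ t, a ≤ t ∧ t < min b s.toList.length ∧ s.toList[t]? = some ' ' := by
  rw [PySem.Str.isIn_iff_infix]
  have htl : (PySem.Str.slice s (some (a : Int)) (some (b : Int))).toList =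
      (s.toList.drop a).take (b - a) := by
    simp [PySem.List.slice_toNat s.toList (by omega : (0:Int) ≤ (a:Int)) (by omega : (0:Int) ≤ (b:Int))]
  rw [htl]
  have hsub : (" " : String).toList = [' '] := by decide
  rw [hsub, List.singleton_infix_iff]
  rw [List.mem_iff_getElem]
  constructor
  · rintro ⟨t, ht, hget⟩
    have hlt : t < b - a ∧ a + t < s.toList.length := by
      have := ht
      simp only [List.length_take, List.length_drop] at this
      omega
    refine ⟨a + t, by omega, by omega, ?_⟩
    rw [List.getElem?_eq_getElem (by omega)]
    rw [List.getElem_take, List.getElem_drop] at hget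
    simp [hget]
  · rintro ⟨t, hat, htb, hget⟩
    have h1 : t < s.toList.length := by omega
    refine ⟨t - a, ?_, ?_⟩
    · simp only [List.length_take, List.length_drop]
      omega
    · rw [List.getElem_take, List.getElem_drop]
      rw [List.getElem?_eq_getElem h1] at hget
      simp only [Option.some.injEq] at hget
      have : a + (t - a) = t := by omega
      simp only [this]
      exact hget

lemma len_slice_nat (s : String) (a b : Nat) :
    PySem.Str.len (PySem.Str.slice s (some (a : Int)) (some (b : Int))) =
      ((min (b - a) (s.toList.length - a) : Nat) : Int) := by
  rw [PySem.Str.len_eq]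
  congr 1
  rw [show (PySem.Str.slice s (some (a : Int)) (some (b : Int))).toList
      = PySem.List.slice s.toList (some (a : Int)) (some (b : Int)) by simp]
  rw [PySem.List.slice_toNat s.toList (by omega) (by omega)]
  simp only [List.length_take, List.length_drop, Int.toNat_natCast]

-- a slice end may be clamped to the string length
lemma slice_min (s : String) (a b : Nat) :
    PySem.Str.slice s (some (a : Int)) (some (b : Int)) =
      PySem.Str.slice s (some (a : Int)) (some ((min b s.toList.length : Nat) : Int)) := by
  apply String.toList_inj.mp
  rw [show (PySem.Str.slice s (some (a : Int)) (some (b : Int))).toList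
      = PySem.List.slice s.toList (some (a : Int)) (some (b : Int)) by simp]
  rw [show (PySem.Str.slice s (some (a : Int)) (some ((min b s.toList.length : Nat) : Int))).toList
      = PySem.List.slice s.toList (some (a : Int)) (some ((min b s.toList.length : Nat) : Int)) by simp]
  rw [PySem.List.slice_toNat s.toList (by omega) (by omega),
      PySem.List.slice_toNat s.toList (by omega) (by omega)]
  by_cases hb : b ≤ s.toList.length
  · rw [Nat.min_eq_left hb]
  · rw [Nat.min_eq_right (by omega)]
    rw [List.take_of_length_le (by simp only [List.length_drop]; omega),
        List.take_of_length_le (by simp only [List.length_drop]; omega)]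

-- "no space in [a, e)" as a bound on pvStop
lemma stop_ge_iff (cs : List Char) (a e : Nat) (he : e ≤ cs.length) :
    e ≤ pvStop cs a ↔ ∀ t, a ≤ t → t < e → cs[t]? ≠ some ' ' := by
  constructor
  · intro h t h1 h2
    exact pvStop_nospace cs a t h1 (by omega)
  · intro h
    by_contra hc
    have hlt : pvStop cs a < e := by omega
    have hsp := pvStop_space cs a (by omega)
    exact h (pvStop cs a) (pvStop_le_self cs a) hlt hsp

-- the next-space fold computes pvStop at every index
lemma pvNxt_spec (s : String) : ∀ (m : Nat) (A : List Int), m ≤ s.toList.length →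
    A.length = s.toList.length + 1 →
    (∀ q, m ≤ q → q ≤ s.toList.length → A.getD q 0 = (pvStop s.toList q : Int)) →
    (∀ q, q ≤ s.toList.length →
      (((List.range m).map (fun (k : Nat) => (k : Int))).reverse.foldl
        (fun nxt p => PySem.List.pySetD nxt p
          (if PySem.Str.pyGet? s p = some ' ' then p else PySem.List.pyGetD nxt (p + 1) 0))
        A).getD q 0 = (pvStop s.toList q : Int)) := by
  intro m
  induction m with
  | zero =>
    intro A _ _ hA q hq
    simpa using hA q (by omega) hq
  | succ m ih =>
    intro A hm hlen hA q hq
    rw [List.range_succ, List.map_append, List.reverse_append]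
    simp only [List.map_cons, List.map_nil, List.reverse_cons, List.reverse_nil,
      List.nil_append, List.cons_append, List.foldl_cons]
    set v : Int := (if PySem.Str.pyGet? s (m : Int) = some ' ' then (m : Int)
      else PySem.List.pyGetD A ((m : Int) + 1) 0) with hv
    have hset : PySem.List.pySetD A (m : Int) v = A.set m v := by
      simp [PySem.List.pySetD_natCast]
    rw [hset]
    apply ih (A.set m v) (by omega) (by simpa using hlen)
    · intro q' hq1 hq2
      by_cases hqm : q' = m
      · subst hqm
        have hgd : (A.set q' v).getD q' 0 = v := by
          have : q' < (A.set q' v).length := by simp only [List.length_set, hlen]; omega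
          rw [List.getD_eq_getElem?_getD, List.getElem?_eq_getElem this]
          simp
        rw [hgd, hv]
        have hmlt : q' < s.toList.length := by omega
        have hget : PySem.Str.pyGet? s (q' : Int) = s.toList[q']? := by
          simp
        by_cases hsp : s.toList[q']? = some ' '
        · rw [if_pos (by rw [hget]; exact hsp)]
          rw [pvStop_here s.toList q' hmlt hsp]
        · rw [if_neg (by rw [hget]; exact hsp)]
          have hcast : (q' : Int) + 1 = ((q' + 1 : Nat) : Int) := by push_cast; ring
          rw [hcast, PySem.List.pyGetD_natCast]
          rw [hA (q' + 1) (by omega) (by omega)]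
          rw [pvStop_step s.toList q' hmlt hsp]
      · have hne : (A.set m v).getD q' 0 = A.getD q' 0 := by
          rw [List.getD_eq_getElem?_getD, List.getD_eq_getElem?_getD,
            List.getElem?_set_ne (by omega)]
        rw [hne]
        exact hA q' (by omega) hq2
    · exact hq

-- A's kept right-extension condition rewritten through pvStop
lemma cond_right (s : String) (I W kk : Nat) (hW : 2 ≤ W) (hIW : I + W ≤ s.toList.length) :
    ((decide (1 < PySem.Str.len (PySem.Str.slice s (some (I : Int))
        (some ((I : Int) + (W : Int) + (kk : Int)))))
      && !(PySem.Str.isIn " " (PySem.Str.slice s (some (I : Int))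
        (some ((I : Int) + (W : Int) + (kk : Int)))))) = true)
    ↔ ((min (I + W + kk) s.toList.length : Nat) : Int) ≤ (pvStop s.toList I : Int) := by
  have hcast : (I : Int) + (W : Int) + (kk : Int) = ((I + W + kk : Nat) : Int) := by
    push_cast; ring
  rw [hcast]
  set e : Nat := min (I + W + kk) s.toList.length with he
  have heN : e ≤ s.toList.length := by omega
  have hae : I + 2 ≤ e := by omega
  have hlen : (1 : Int) < PySem.Str.len (PySem.Str.slice s (some (I : Int))
      (some ((I + W + kk : Nat) : Int))) := by
    rw [len_slice_nat]
    have : 2 ≤ min (I + W + kk - I) (s.toList.length - I) := by omega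
    omega
  have hsp : PySem.Str.isIn " " (PySem.Str.slice s (some (I : Int))
      (some ((I + W + kk : Nat) : Int))) = false ↔
      (e : Int) ≤ (pvStop s.toList I : Int) := by
    rw [← Bool.not_eq_true, isIn_space_slice s I (I + W + kk)]
    rw [show min (I + W + kk) s.toList.length = e from rfl]
    rw [Nat.cast_le]
    rw [stop_ge_iff s.toList I e heN]
    constructor
    · intro h t h1 h2 hc
      exact h ⟨t, h1, h2, hc⟩
    · rintro h ⟨t, h1, h2, h3⟩
      exact h t h1 h2 h3
  constructor
  · intro h
    simp only [Bool.and_eq_true, decide_eq_true_eq, Bool.not_eq_true'] at h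
    exact hsp.mp h.2
  · intro h
    simp only [Bool.and_eq_true, decide_eq_true_eq, Bool.not_eq_true']
    exact ⟨hlen, hsp.mpr h⟩

-- A's kept left-extension condition rewritten through pvStop
lemma cond_left (s : String) (I W kk : Nat) (hW : 2 ≤ W) (hIW : I + W ≤ s.toList.length)
    (hk : kk ≤ I) :
    ((decide (1 < PySem.Str.len (PySem.Str.slice s (some ((I : Int) - (kk : Int)))
        (some ((I : Int) + (W : Int)))))
      && !(PySem.Str.isIn " " (PySem.Str.slice s (some ((I : Int) - (kk : Int)))
        (some ((I : Int) + (W : Int)))))) = true)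
    ↔ ((I : Int) + (W : Int)) ≤ (pvStop s.toList (I - kk) : Int) := by
  have hc1 : (I : Int) - (kk : Int) = ((I - kk : Nat) : Int) := by omega
  have hc2 : (I : Int) + (W : Int) = ((I + W : Nat) : Int) := by push_cast; ring
  rw [hc1, hc2]
  have hlen : (1 : Int) < PySem.Str.len (PySem.Str.slice s (some ((I - kk : Nat) : Int))
      (some ((I + W : Nat) : Int))) := by
    rw [len_slice_nat]
    have : 2 ≤ min (I + W - (I - kk)) (s.toList.length - (I - kk)) := by omega
    omega
  have hsp : PySem.Str.isIn " " (PySem.Str.slice s (some ((I - kk : Nat) : Int))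
      (some ((I + W : Nat) : Int))) = false ↔
      ((I + W : Nat) : Int) ≤ (pvStop s.toList (I - kk) : Int) := by
    rw [← Bool.not_eq_true, isIn_space_slice s (I - kk) (I + W)]
    rw [Nat.min_eq_left hIW]
    rw [Nat.cast_le]
    rw [stop_ge_iff s.toList (I - kk) (I + W) hIW]
    constructor
    · intro h t h1 h2 hc
      exact h ⟨t, h1, h2, hc⟩
    · rintro h ⟨t, h1, h2, h3⟩
      exact h t h1 h2 h3
  constructor
  · intro h
    simp only [Bool.and_eq_true, decide_eq_true_eq, Bool.not_eq_true'] at h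
    exact hsp.mp h.2
  · intro h
    simp only [Bool.and_eq_true, decide_eq_true_eq, Bool.not_eq_true']
    exact ⟨hlen, hsp.mpr h⟩

-- the per-word groups of the two ports coincide
lemma group_eq (s word : String) (nxt : List Int)
    (hnxt : ∀ q, q ≤ s.toList.length → nxt.getD q 0 = (pvStop s.toList q : Int))
    (h2 : ¬ PySem.Str.len word < 2) (hf : 0 ≤ PySem.Str.find s word) :
    ((PySem.List.pyRange 1 (PySem.Str.find s word) 1).foldl
      (fun wl left_index =>
        if decide (1 < PySem.Str.len (PySem.Str.slice s (some (PySem.Str.find s word - left_index))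
              (some (PySem.Str.find s word + PySem.Str.len word)))) &&
           !(PySem.Str.isIn " " (PySem.Str.slice s (some (PySem.Str.find s word - left_index))
              (some (PySem.Str.find s word + PySem.Str.len word))))
        then wl ++ [PySem.Str.slice s (some (PySem.Str.find s word - left_index))
              (some (PySem.Str.find s word + PySem.Str.len word))] else wl)
      ((PySem.List.pyRange 1 (PySem.Str.len s - PySem.Str.find s word) 1).foldl
        (fun wl right_index =>
          if decide (1 < PySem.Str.len (PySem.Str.slice s (some (PySem.Str.find s word))
                (some (PySem.Str.find s word + PySem.Str.len word + right_index)))) &&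
             !(PySem.Str.isIn " " (PySem.Str.slice s (some (PySem.Str.find s word))
                (some (PySem.Str.find s word + PySem.Str.len word + right_index))))
          then wl ++ [PySem.Str.slice s (some (PySem.Str.find s word))
                (some (PySem.Str.find s word + PySem.Str.len word + right_index))] else wl)
        [word]))
    =
    ((PySem.List.pyRange 1 (PySem.Str.find s word) 1).foldl (fun g k =>
      if PySem.List.pyGetD nxt (PySem.Str.find s word - k) 0 ≥
          PySem.Str.find s word + PySem.Str.len word then
        g ++ [PySem.Str.slice s (some (PySem.Str.find s word - k))
          (some (PySem.Str.find s word + PySem.Str.len word))] else g)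
      ((PySem.List.pyRange 1 (PySem.Str.len s - PySem.Str.find s word) 1).foldl (fun g k =>
        let e := min (PySem.Str.find s word + PySem.Str.len word + k) (PySem.Str.len s)
        if PySem.List.pyGetD nxt (PySem.Str.find s word) 0 ≥ e then
          g ++ [PySem.Str.slice s (some (PySem.Str.find s word)) (some e)] else g)
        [word])) := by
  obtain ⟨I, hfind⟩ : ∃ I : Nat, PySem.Str.find s word = (I : Int) :=
    ⟨_, Int.eq_natCast_toNat.mpr hf⟩
  have hW : PySem.Str.len word = ((word.toList.length : Nat) : Int) := PySem.Str.len_eq word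
  have hN : PySem.Str.len s = ((s.toList.length : Nat) : Int) := PySem.Str.len_eq s
  set W := word.toList.length with hWdef
  set n := s.toList.length with hndef
  have h2' : 2 ≤ W := by rw [hW] at h2; omega
  have hfc : PySem.Chars.find s.toList word.toList = (I : Int) := by
    rw [← hfind]; simp
  have hspec := PySem.Chars.find_spec (s := s.toList) (sub := word.toList)
    (by rw [hfc]; omega)
  have hocc : word.toList <+: s.toList.drop I := by
    have := hspec.1
    rw [hfc] at this
    simpa using this
  have hIle : I ≤ n := by
    have := PySem.Chars.find_le_length s.toList word.toList
    rw [hfc] at this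
    exact_mod_cast this
  have hWle : W ≤ n - I := by
    have := hocc.length_le
    simpa [hndef] using this
  have hIW : I + W ≤ n := by omega
  rw [hfind, hW, hN]
  -- the right folds agree pointwise
  have hright : ∀ (init : List String),
      (PySem.List.pyRange 1 ((n : Int) - (I : Int)) 1).foldl
        (fun wl right_index =>
          if decide (1 < PySem.Str.len (PySem.Str.slice s (some (I : Int))
                (some ((I : Int) + (W : Int) + right_index)))) &&
             !(PySem.Str.isIn " " (PySem.Str.slice s (some (I : Int))
                (some ((I : Int) + (W : Int) + right_index))))
          then wl ++ [PySem.Str.slice s (some (I : Int))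
                (some ((I : Int) + (W : Int) + right_index))] else wl)
        init =
      (PySem.List.pyRange 1 ((n : Int) - (I : Int)) 1).foldl (fun g k =>
        let e := min ((I : Int) + (W : Int) + k) (n : Int)
        if PySem.List.pyGetD nxt (I : Int) 0 ≥ e then
          g ++ [PySem.Str.slice s (some (I : Int)) (some e)] else g) init := by
    intro init
    apply PySem.List.foldl_congr_mem
    intro acc k hk
    rw [PySem.List.mem_pyRange_one] at hk
    lift k to Nat using (by omega) with kk
    have hcast : (I : Int) + (W : Int) + (kk : Int) = ((I + W + kk : Nat) : Int) := by
      push_cast; ring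
    have hmin : min ((I : Int) + (W : Int) + (kk : Int)) ((n : Nat) : Int) =
        ((min (I + W + kk) n : Nat) : Int) := by omega
    have hB : (PySem.List.pyGetD nxt (I : Int) 0 ≥ min ((I : Int) + (W : Int) + (kk : Int)) ((n : Nat) : Int)) ↔
        ((min (I + W + kk) n : Nat) : Int) ≤ (pvStop s.toList I : Int) := by
      rw [hmin, PySem.List.pyGetD_natCast, hnxt I hIle]
    have hcond := cond_right s I W kk h2' hIW
    have hslice : PySem.Str.slice s (some (I : Int)) (some ((I : Int) + (W : Int) + (kk : Int))) =
        PySem.Str.slice s (some (I : Int)) (some (min ((I : Int) + (W : Int) + (kk : Int)) ((n : Nat) : Int))) := by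
      rw [hmin, hcast]
      exact slice_min s I (I + W + kk)
    by_cases hc : ((min (I + W + kk) n : Nat) : Int) ≤ (pvStop s.toList I : Int)
    · rw [if_pos (hcond.mpr hc), if_pos (hB.mpr hc), hslice]
    · rw [if_neg (fun h => hc (hcond.mp h)), if_neg (fun h => hc (hB.mp h))]
  rw [hright]
  -- the left folds agree pointwise
  apply PySem.List.foldl_congr_mem
  intro acc k hk
  rw [PySem.List.mem_pyRange_one] at hk
  lift k to Nat using (by omega) with kk
  have hkI : kk ≤ I := by omega
  have hB : (PySem.List.pyGetD nxt ((I : Int) - (kk : Int)) 0 ≥ (I : Int) + (W : Int)) ↔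
      ((I : Int) + (W : Int)) ≤ (pvStop s.toList (I - kk) : Int) := by
    rw [show (I : Int) - (kk : Int) = ((I - kk : Nat) : Int) by omega]
    rw [PySem.List.pyGetD_natCast, hnxt (I - kk) (by omega)]
  have hcond := cond_left s I W kk h2' hIW hkI
  by_cases hc : ((I : Int) + (W : Int)) ≤ (pvStop s.toList (I - kk) : Int)
  · rw [if_pos (hcond.mpr hc), if_pos (hB.mpr hc)]
  · rw [if_neg (fun h => hc (hcond.mp h)), if_neg (fun h => hc (hB.mp h))]

-- the outer folds agree, with the set of seen words mirroring A's group-membership test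
lemma fold_eq (s : String) (nxt : List Int)
    (hnxt : ∀ q, q ≤ s.toList.length → nxt.getD q 0 = (pvStop s.toList q : Int)) :
    ∀ (ws : List String) (outA : List (List String)) (seen : PySem.Set String),
    (∀ g, PySem.Set.contains seen g = true ↔
      ((PySem.List.pyRange 1 (PySem.Str.find s g) 1).foldl
        (fun wl left_index =>
          if decide (1 < PySem.Str.len (PySem.Str.slice s (some (PySem.Str.find s g - left_index))
                (some (PySem.Str.find s g + PySem.Str.len g)))) &&
             !(PySem.Str.isIn " " (PySem.Str.slice s (some (PySem.Str.find s g - left_index))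
                (some (PySem.Str.find s g + PySem.Str.len g))))
          then wl ++ [PySem.Str.slice s (some (PySem.Str.find s g - left_index))
                (some (PySem.Str.find s g + PySem.Str.len g))] else wl)
        ((PySem.List.pyRange 1 (PySem.Str.len s - PySem.Str.find s g) 1).foldl
          (fun wl right_index =>
            if decide (1 < PySem.Str.len (PySem.Str.slice s (some (PySem.Str.find s g))
                  (some (PySem.Str.find s g + PySem.Str.len g + right_index)))) &&
               !(PySem.Str.isIn " " (PySem.Str.slice s (some (PySem.Str.find s g))
                  (some (PySem.Str.find s g + PySem.Str.len g + right_index))))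
            then wl ++ [PySem.Str.slice s (some (PySem.Str.find s g))
                  (some (PySem.Str.find s g + PySem.Str.len g + right_index))] else wl)
          [g])) ∈ outA) →
    ws.foldl (fun superlap_list word =>
      if PySem.Str.len word < 2 then superlap_list else
      if PySem.Str.find s word ≥ 0 then
        (if ((PySem.List.pyRange 1 (PySem.Str.find s word) 1).foldl
          (fun wl left_index =>
            if decide (1 < PySem.Str.len (PySem.Str.slice s (some (PySem.Str.find s word - left_index))
                  (some (PySem.Str.find s word + PySem.Str.len word)))) &&
               !(PySem.Str.isIn " " (PySem.Str.slice s (some (PySem.Str.find s word - left_index))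
                  (some (PySem.Str.find s word + PySem.Str.len word))))
            then wl ++ [PySem.Str.slice s (some (PySem.Str.find s word - left_index))
                  (some (PySem.Str.find s word + PySem.Str.len word))] else wl)
          ((PySem.List.pyRange 1 (PySem.Str.len s - PySem.Str.find s word) 1).foldl
            (fun wl right_index =>
              if decide (1 < PySem.Str.len (PySem.Str.slice s (some (PySem.Str.find s word))
                    (some (PySem.Str.find s word + PySem.Str.len word + right_index)))) &&
                 !(PySem.Str.isIn " " (PySem.Str.slice s (some (PySem.Str.find s word))
                    (some (PySem.Str.find s word + PySem.Str.len word + right_index))))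
              then wl ++ [PySem.Str.slice s (some (PySem.Str.find s word))
                    (some (PySem.Str.find s word + PySem.Str.len word + right_index))] else wl)
            [word])) ∉ superlap_list then
          superlap_list ++ [((PySem.List.pyRange 1 (PySem.Str.find s word) 1).foldl
          (fun wl left_index =>
            if decide (1 < PySem.Str.len (PySem.Str.slice s (some (PySem.Str.find s word - left_index))
                  (some (PySem.Str.find s word + PySem.Str.len word)))) &&
               !(PySem.Str.isIn " " (PySem.Str.slice s (some (PySem.Str.find s word - left_index))
                  (some (PySem.Str.find s word + PySem.Str.len word))))
            then wl ++ [PySem.Str.slice s (some (PySem.Str.find s word - left_index))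
                  (some (PySem.Str.find s word + PySem.Str.len word))] else wl)
          ((PySem.List.pyRange 1 (PySem.Str.len s - PySem.Str.find s word) 1).foldl
            (fun wl right_index =>
              if decide (1 < PySem.Str.len (PySem.Str.slice s (some (PySem.Str.find s word))
                    (some (PySem.Str.find s word + PySem.Str.len word + right_index)))) &&
                 !(PySem.Str.isIn " " (PySem.Str.slice s (some (PySem.Str.find s word))
                    (some (PySem.Str.find s word + PySem.Str.len word + right_index))))
              then wl ++ [PySem.Str.slice s (some (PySem.Str.find s word))
                    (some (PySem.Str.find s word + PySem.Str.len word + right_index))] else wl)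
            [word]))] else superlap_list)
      else superlap_list) outA =
    (ws.foldl (fun st word =>
      if PySem.Str.len word < 2 ∨ PySem.Set.contains st.2 word then st else
      if PySem.Str.find s word < 0 then st else
      (st.1 ++ [(PySem.List.pyRange 1 (PySem.Str.find s word) 1).foldl (fun g k =>
          if PySem.List.pyGetD nxt (PySem.Str.find s word - k) 0 ≥
              PySem.Str.find s word + PySem.Str.len word then
            g ++ [PySem.Str.slice s (some (PySem.Str.find s word - k))
              (some (PySem.Str.find s word + PySem.Str.len word))] else g)
        ((PySem.List.pyRange 1 (PySem.Str.len s - PySem.Str.find s word) 1).foldl (fun g k =>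
          let e := min (PySem.Str.find s word + PySem.Str.len word + k) (PySem.Str.len s)
          if PySem.List.pyGetD nxt (PySem.Str.find s word) 0 ≥ e then
            g ++ [PySem.Str.slice s (some (PySem.Str.find s word)) (some e)] else g)
          [word])],
        PySem.Set.add st.2 word)) (outA, seen)).1 := by
  intro ws
  induction ws with
  | nil => intro outA seen hinv; simp
  | cons w ws ih =>
    intro outA seen hinv
    simp only [List.foldl_cons]
    by_cases h2 : PySem.Str.len w < 2
    · rw [if_pos h2, if_pos (Or.inl h2)]
      exact ih outA seen hinv
    · rw [if_neg h2]
      by_cases hf : 0 ≤ PySem.Str.find s w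
      · rw [if_pos (show PySem.Str.find s w ≥ 0 from hf)]
        have hg := group_eq s w nxt hnxt h2 hf
        by_cases hseen : PySem.Set.contains seen w = true
        · -- already produced: A's membership test fires via the invariant
          have hmem := (hinv w).mp hseen
          rw [if_neg (not_not_intro hmem)]
          rw [if_pos (Or.inr hseen)]
          exact ih outA seen hinv
        · -- a new word: both sides append the (equal) group
          have hnmem : _ ∉ outA := fun hc => hseen ((hinv w).mpr hc)
          rw [if_pos hnmem]
          rw [if_neg (not_or_intro h2 hseen)]
          rw [if_neg (show ¬ PySem.Str.find s w < 0 from by omega)]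
          rw [hg]
          apply ih
          intro g
          rw [PySem.Set.contains_iff, PySem.Set.mem_add]
          rw [← PySem.Set.contains_iff, hinv g]
          simp only [List.mem_append, List.mem_singleton]
          constructor
          · rintro (h | h)
            · exact Or.inl h
            · subst h
              exact Or.inr hg
          · rintro (h | h)
            · exact Or.inl h
            · right
              rw [← hg] at h
              have hh := h
              simp only [PySem.List.foldl_append_if] at hh
              simp only [List.cons_append, List.cons.injEq] at hh
              exact hh.1
      · rw [if_neg (show ¬ PySem.Str.find s w ≥ 0 from hf)]
        by_cases hseen : PySem.Set.contains seen w = true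
        · rw [if_pos (Or.inr hseen)]
          exact ih outA seen hinv
        · rw [if_neg (not_or_intro h2 hseen)]
          rw [if_pos (show PySem.Str.find s w < 0 from by omega)]
          exact ih outA seen hinv

lemma ports_eq (words_list : List String) (sentence : String) :
    get_all_superlap_py words_list sentence = get_all_superlap_py_alt words_list sentence := by
  have hN : PySem.Str.len sentence = ((sentence.toList.length : Nat) : Int) :=
    PySem.Str.len_eq sentence
  have hnxt : ∀ q, q ≤ sentence.toList.length →
      (((PySem.List.pyRange 0 (PySem.Str.len sentence) 1).reverse).foldl
        (fun nxt p => PySem.List.pySetD nxt p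
          (if PySem.Str.pyGet? sentence p = some ' ' then p
           else PySem.List.pyGetD nxt (p + 1) 0))
        (List.replicate (PySem.Str.len sentence + 1).toNat (PySem.Str.len sentence))).getD q 0
      = (pvStop sentence.toList q : Int) := by
    have hrange : PySem.List.pyRange 0 (PySem.Str.len sentence) 1 =
        (List.range sentence.toList.length).map (fun (k : Nat) => (k : Int)) := by
      rw [hN]; rw [PySem.List.pyRange_zero_natCast]
    have hrepl : (PySem.Str.len sentence + 1).toNat = sentence.toList.length + 1 := by
      rw [hN]; omega
    rw [hrange, hrepl, hN]
    intro q hq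
    apply pvNxt_spec sentence sentence.toList.length _ le_rfl (by simp) _ q hq
    intro q' h1 h2
    have hq' : q' = sentence.toList.length := le_antisymm h2 h1
    subst hq'
    rw [List.getD_eq_getElem?_getD, List.getElem?_replicate, if_pos (by omega)]
    rw [Option.getD_some, pvStop_past sentence.toList _ le_rfl]
  have hempty : ∀ g : String, PySem.Set.contains PySem.Set.empty g = true ↔
      ([] : List String) ∈ ([] : List (List String)) := by
    intro g
    rw [PySem.Set.contains_iff]
    simp [PySem.Set.empty]
  have h := fold_eq sentence _ hnxt words_list [] PySem.Set.empty (by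
    intro g
    rw [PySem.Set.contains_iff]
    simp [PySem.Set.empty])
  exact h

-- ===== VERDICT (by name: the statement is the Claim_ definition above) =====
theorem get_all_superlap_py_spec : Claim_equal_get_all_superlap_py := by
  intro words_list sentence _
  unfold Spec_get_all_superlap_py
  exact ports_eq words_list sentence
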